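-- pv_equiv track=rewrite | github.com/lonejavid/Translation_Services | server/services/speaker_segments.py | _speaker_ids_stable_by_gender
-- ===== SOURCE A (Python) =====
-- def _speaker_ids_stable_by_gender(smoothed: list[str]) -> list[int]:
--     """
--     Male segments → speaker 0, female → 1, neutral/unknown → previous bucket.
--     Same speaker returning later with the same detected sex keeps the same id.
--     """
--     out: list[int] = []
--     last = 0
--     for g in smoothed:
--         if g == "male":
--             last = 0
--             out.append(0)
--         elif g == "female":
--             last = 1
--             out.append(1)
--         else:
--             out.append(last)
--     return out
-- ===== SOURCE B (Python) =====
-- def _speaker_ids_stable_by_gender(smoothed: list[str]) -> list[int]: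
--     # Run-length construction: locate the concrete "male"/"female" markers with
--     # their positions, then emit the output as blocks of repeated ids between
--     # consecutive marker positions (leading gap is speaker 0). No per-element
--     # carried state.
--     n = len(smoothed)
--     marks = [(i, 0 if g == "male" else 1)
--              for i, g in enumerate(smoothed) if g in ("male", "female")]
--     out = [0] * (marks[0][0] if marks else n)
--     for k, (i, v) in enumerate(marks):
--         nxt = marks[k + 1][0] if k + 1 < len(marks) else n
--         out += [v] * (nxt - i)
--     return out
-- ===== Notes on version B (the rewrite author's own statement) =====
-- stated objective: alternative
-- what changed: Replaced the stateful per-element carry loop by a run-length construction: collect the positions of concrete male/female markers, then emit the output as repeated blocks between consecutive marker positions (leading gap filled with 0).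
import Mathlib
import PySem

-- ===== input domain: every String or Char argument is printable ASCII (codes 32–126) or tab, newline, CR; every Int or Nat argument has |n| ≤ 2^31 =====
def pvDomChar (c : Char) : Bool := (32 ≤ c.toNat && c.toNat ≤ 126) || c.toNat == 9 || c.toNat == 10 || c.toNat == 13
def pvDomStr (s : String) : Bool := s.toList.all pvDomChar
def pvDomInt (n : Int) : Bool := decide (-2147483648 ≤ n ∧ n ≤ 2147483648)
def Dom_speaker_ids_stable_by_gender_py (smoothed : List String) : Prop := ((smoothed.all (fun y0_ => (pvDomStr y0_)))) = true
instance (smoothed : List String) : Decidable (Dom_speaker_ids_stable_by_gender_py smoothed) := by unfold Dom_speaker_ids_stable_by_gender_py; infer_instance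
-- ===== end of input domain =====

-- B replaces A's stateful carry loop by a run-length block construction from marker positions (objective: alternative).


-- ===== PORT A =====
-- A: single loop carrying (out, last); last updates on "male"/"female", else repeats.
def speaker_ids_stable_by_gender_py (smoothed : List String) : List Int :=
  (smoothed.foldl (fun (st : List Int × Int) g =>
    if g = "male" then (st.1 ++ [0], 0)
    else if g = "female" then (st.1 ++ [1], 1)
    else (st.1 ++ [st.2], st.2)) ([], 0)).1

-- ===== PORT B =====
-- B: marker positions, then blocks of repeated ids between consecutive markers.
def pvMarks (smoothed : List String) : List (Int × Int) :=
  (PySem.List.enumerate smoothed).filterMap (fun p =>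
    if p.2 = "male" ∨ p.2 = "female" then
      some (p.1, if p.2 = "male" then 0 else 1)
    else none)

-- the loop: for each marker (i, v), append v repeated up to the next marker (or n)
def pvBlocks (n : Int) : List (Int × Int) → List Int
  | [] => []
  | (i, v) :: rest =>
      let nxt := match rest with
        | [] => n
        | (j, _) :: _ => j
      List.replicate (nxt - i).toNat v ++ pvBlocks n rest

def speaker_ids_stable_by_gender_py_alt (smoothed : List String) : List Int :=
  let n : Int := smoothed.length
  let marks := pvMarks smoothed
  let lead : Int := match marks with
    | [] => n
    | (i, _) :: _ => i
  List.replicate lead.toNat 0 ++ pvBlocks n marks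

-- ===== PRECONDITION & SPEC =====
def Spec_speaker_ids_stable_by_gender_py (smoothed : List String) (out : List Int) : Prop := out = speaker_ids_stable_by_gender_py_alt smoothed
instance (smoothed : List String) (out : List Int) : Decidable (Spec_speaker_ids_stable_by_gender_py smoothed out) := by unfold Spec_speaker_ids_stable_by_gender_py; infer_instance

-- ===== CLAIM (what is proved, stated in full; the proofs are below) =====
def Claim_equal_speaker_ids_stable_by_gender_py : Prop := ∀ (smoothed : List String), Dom_speaker_ids_stable_by_gender_py smoothed → Spec_speaker_ids_stable_by_gender_py smoothed (speaker_ids_stable_by_gender_py smoothed)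

-- ===== LEMMAS AND PROOFS =====

-- reference forward-fill recursion, the common spec of both ports
def pvRef (last : Int) : List String → List Int
  | [] => []
  | g :: t =>
      if g = "male" then (0 : Int) :: pvRef 0 t
      else if g = "female" then (1 : Int) :: pvRef 1 t
      else last :: pvRef last t

-- generalized marks with an arbitrary start index
def pvMarksFrom (k : Int) (l : List String) : List (Int × Int) :=
  (PySem.List.enumerate l k).filterMap (fun p =>
    if p.2 = "male" ∨ p.2 = "female" then
      some (p.1, if p.2 = "male" then 0 else 1)
    else none)

theorem pvMarksFrom_nil (k : Int) : pvMarksFrom k [] = [] := rfl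

theorem pvMarksFrom_cons (k : Int) (g : String) (t : List String) :
    pvMarksFrom k (g :: t) =
      (if g = "male" ∨ g = "female" then
        [(k, if g = "male" then (0 : Int) else 1)] else []) ++ pvMarksFrom (k + 1) t := by
  unfold pvMarksFrom
  rw [PySem.List.enumerate_cons, List.filterMap_cons]
  by_cases hg : g = "male" ∨ g = "female" <;> simp [hg]

theorem pvMarksFrom_head_ge (k : Int) (l : List String) :
    ∀ i v rest, pvMarksFrom k l = (i, v) :: rest → k ≤ i := by
  induction l generalizing k with
  | nil => intro i v rest h; simp [pvMarksFrom_nil] at h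
  | cons g t ih =>
      intro i v rest h
      rw [pvMarksFrom_cons] at h
      by_cases hg : g = "male" ∨ g = "female"
      · simp [hg] at h; omega
      · simp [hg] at h
        have := ih (k + 1) i v rest h
        omega

-- the key invariant: block construction from offset k computes the forward fill
theorem pv_blocks_ref (l : List String) : ∀ (k last : Int),
    (List.replicate ((match pvMarksFrom k l with
        | [] => k + l.length
        | (i, _) :: _ => i) - k).toNat last ++ pvBlocks (k + l.length) (pvMarksFrom k l))
      = pvRef last l := by
  induction l with
  | nil => intro k last; simp [pvMarksFrom_nil, pvBlocks, pvRef]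
  | cons g t ih =>
      intro k last
      rw [pvMarksFrom_cons]
      by_cases hg : g = "male" ∨ g = "female"
      · -- marker at position k; its block covers until next marker (≥ k+1) or end
        simp only [hg, if_true, List.singleton_append]
        have hlen : (k : Int) + (g :: t).length = (k + 1) + t.length := by
          simp; omega
        set v : Int := if g = "male" then 0 else 1 with hv
        have hnext : k + 1 ≤ (match pvMarksFrom (k+1) t with
            | [] => (k + 1) + (t.length : Int)
            | (i, _) :: _ => i) := by
          cases hm : pvMarksFrom (k+1) t with
          | nil => simp
          | cons p rest =>
              have := pvMarksFrom_head_ge (k+1) t p.1 p.2 rest (by simpa using hm)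
              simpa using this
        rw [hlen]
        have hrefl : pvRef last (g :: t) = v :: pvRef v t := by
          rcases hg with h | h <;> simp [pvRef, h, hv]
        rw [hrefl, ← ih (k+1) v]
        -- LHS: replicate 0 last ++ pvBlocks with head (k, v)
        simp only [sub_self, Int.toNat_zero, List.replicate_zero, List.nil_append, pvBlocks]
        cases hm : pvMarksFrom (k+1) t with
        | nil =>
            simp [pvBlocks]
            have h1 : ((k + 1 + (t.length : Int)) - k).toNat = t.length + 1 := by omega
            rw [h1, List.replicate_succ]
        | cons p rest =>
            obtain ⟨j, w⟩ := p
            have hj : k + 1 ≤ j := by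
              have := hnext; rw [hm] at this; simpa using this
            simp only [pvBlocks]
            have h1 : (j - k).toNat = (j - (k+1)).toNat + 1 := by omega
            rw [h1, List.replicate_succ]
            simp
      · -- neutral: carried value, marks unchanged
        have hgm : ¬ g = "male" := fun h => hg (Or.inl h)
        have hgf : ¬ g = "female" := fun h => hg (Or.inr h)
        simp only [hg, if_false, List.nil_append]
        have hlen : (k : Int) + (g :: t).length = (k + 1) + t.length := by
          simp; omega
        rw [hlen]
        have hnext : k + 1 ≤ (match pvMarksFrom (k+1) t with
            | [] => (k + 1) + (t.length : Int)
            | (i, _) :: _ => i) := by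
          cases hm : pvMarksFrom (k+1) t with
          | nil => simp
          | cons p rest =>
              have := pvMarksFrom_head_ge (k+1) t p.1 p.2 rest (by simpa using hm)
              simpa using this
        have hrefl : pvRef last (g :: t) = last :: pvRef last t := by
          simp [pvRef, hgm, hgf]
        rw [hrefl, ← ih (k+1) last]
        have h1 : ((match pvMarksFrom (k+1) t with
            | [] => (k + 1) + (t.length : Int)
            | (i, _) :: _ => i) - k).toNat
          = ((match pvMarksFrom (k+1) t with
            | [] => (k + 1) + (t.length : Int)
            | (i, _) :: _ => i) - (k+1)).toNat + 1 := by omega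
        rw [h1, List.replicate_succ]
        simp

-- A's fold computes the forward fill
theorem pv_fold_ref (l : List String) : ∀ (acc : List Int) (last : Int),
    (l.foldl (fun (st : List Int × Int) g =>
      if g = "male" then (st.1 ++ [0], 0)
      else if g = "female" then (st.1 ++ [1], 1)
      else (st.1 ++ [st.2], st.2)) (acc, last)).1
    = acc ++ pvRef last l := by
  induction l with
  | nil => intro acc last; simp [pvRef]
  | cons h t ih =>
      intro acc last
      by_cases h1 : h = "male"
      · simp [h1, pvRef, ih]
      · by_cases h2 : h = "female"
        · simp [h2, pvRef, ih]
        · simp [h1, h2, pvRef, ih]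

-- ===== VERDICT (by name: the statement is the Claim_ definition above) =====
theorem speaker_ids_stable_by_gender_py_spec : Claim_equal_speaker_ids_stable_by_gender_py := by
  intro smoothed _
  unfold Spec_speaker_ids_stable_by_gender_py speaker_ids_stable_by_gender_py speaker_ids_stable_by_gender_py_alt
  have hm : pvMarks smoothed = pvMarksFrom 0 smoothed := rfl
  have hA := pv_fold_ref smoothed [] 0
  have hB := pv_blocks_ref smoothed 0 0
  simp only [List.nil_append] at hA
  rw [hA, hm, ← hB]
  cases pvMarksFrom 0 smoothed <;> simp
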